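-- pv_equiv track=rewrite | github.com/louisaberdeen/signal-MAE | src/embeddings/checkpoint.py | _is_encoder_only
-- ===== SOURCE A (Python) =====
-- def _is_encoder_only(state_dict: dict) -> bool:
--     """Check if checkpoint is encoder-only."""
--     decoder_keys = [
--         'mask_token', 'decoder_embed', 'decoder_pos_embed',
--         'decoder_norm', 'pred_head', 'encoder_to_decoder'
--     ]
--     decoder_block_keys = [k for k in state_dict.keys() if k.startswith('decoder_blocks.')]
--
--     has_decoder = any(k in state_dict or f"{k}.weight" in state_dict for k in decoder_keys)
--     has_decoder_blocks = len(decoder_block_keys) > 0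
--
--     return not (has_decoder or has_decoder_blocks)
-- ===== SOURCE B (Python) =====
-- def _is_encoder_only(state_dict: dict) -> bool:
--     """Check if checkpoint is encoder-only."""
--     base = ['mask_token', 'decoder_embed', 'decoder_pos_embed',
--             'decoder_norm', 'pred_head', 'encoder_to_decoder']
--     triggers = set(base) | {f"{k}.weight" for k in base}
--     for key in state_dict.keys():
--         if key in triggers or key.startswith('decoder_blocks.'):
--             return False
--     return True
-- ===== Notes on version B (the rewrite author's own statement) =====
-- stated objective: simpler
-- what changed: Replaces A's per-candidate dict lookups plus a separate comprehension scan with one precomputed trigger set and a single early-exit pass over the real keys.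
import Mathlib
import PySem

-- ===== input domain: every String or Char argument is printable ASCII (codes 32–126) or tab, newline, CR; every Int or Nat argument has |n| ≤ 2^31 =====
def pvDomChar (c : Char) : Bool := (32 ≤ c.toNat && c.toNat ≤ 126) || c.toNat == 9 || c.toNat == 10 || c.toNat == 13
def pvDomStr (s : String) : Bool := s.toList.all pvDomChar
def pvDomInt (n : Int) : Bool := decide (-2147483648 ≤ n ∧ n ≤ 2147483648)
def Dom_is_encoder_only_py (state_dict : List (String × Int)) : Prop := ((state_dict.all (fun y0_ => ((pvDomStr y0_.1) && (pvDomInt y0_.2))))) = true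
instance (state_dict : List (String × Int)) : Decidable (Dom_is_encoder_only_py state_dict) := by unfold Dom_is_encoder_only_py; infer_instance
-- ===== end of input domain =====

-- B replaces A's per-candidate dict lookups plus a separate key-comprehension scan with one
-- precomputed trigger set and a single early-exit pass over the keys (simpler decomposition).

-- ===== PORT A =====
def is_encoder_only_py (state_dict : List (String × Int)) : Bool :=
  let sd := PySem.Dict.mk state_dict
  let decoder_keys : List String :=
    ["mask_token", "decoder_embed", "decoder_pos_embed",
     "decoder_norm", "pred_head", "encoder_to_decoder"]
  let decoder_block_keys := sd.keys.filter (fun k => PySem.Str.startswith k "decoder_blocks.")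
  let has_decoder := decoder_keys.any (fun k => sd.contains k || sd.contains (k ++ ".weight"))
  let has_decoder_blocks := decide (decoder_block_keys.length > 0)
  !(has_decoder || has_decoder_blocks)

-- ===== PORT B =====
def pvBase : List String :=
  ["mask_token", "decoder_embed", "decoder_pos_embed",
   "decoder_norm", "pred_head", "encoder_to_decoder"]

-- the single early-exit pass of B's for-loop
def pvScan (triggers : PySem.Set String) : List (String × Int) → Bool
  | [] => true
  | (key, _) :: rest =>
    if PySem.Set.contains triggers key || PySem.Str.startswith key "decoder_blocks." then false
    else pvScan triggers rest

def is_encoder_only_py_alt (state_dict : List (String × Int)) : Bool :=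
  let triggers := PySem.Set.union (PySem.Set.ofList pvBase)
                    (PySem.Set.ofList (pvBase.map (fun k => k ++ ".weight")))
  pvScan triggers state_dict

-- ===== PRECONDITION & SPEC =====
def Spec_is_encoder_only_py (state_dict : List (String × Int)) (out : Bool) : Prop := out = is_encoder_only_py_alt state_dict
instance (state_dict : List (String × Int)) (out : Bool) : Decidable (Spec_is_encoder_only_py state_dict out) := by unfold Spec_is_encoder_only_py; infer_instance

-- ===== CLAIM (what is proved, stated in full; the proofs are below) =====
def Claim_equal_is_encoder_only_py : Prop := ∀ (state_dict : List (String × Int)), Dom_is_encoder_only_py state_dict → Spec_is_encoder_only_py state_dict (is_encoder_only_py state_dict)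

-- ===== LEMMAS AND PROOFS =====

-- the common per-key trigger test both sides reduce to
def pvTrig (k : String) : Bool :=
  PySem.Set.contains
    (PySem.Set.union (PySem.Set.ofList pvBase)
      (PySem.Set.ofList (pvBase.map (fun b => b ++ ".weight")))) k
  || PySem.Str.startswith k "decoder_blocks."

lemma pvScan_eq_any (t : PySem.Set String) (l : List (String × Int)) :
    pvScan t l = !(l.any (fun p => PySem.Set.contains t p.1 || PySem.Str.startswith p.1 "decoder_blocks.")) := by
  induction l with
  | nil => rfl
  | cons p rest ih =>
    obtain ⟨k, v⟩ := p
    simp only [pvScan, List.any_cons]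
    split_ifs with h
    · simp only [h, Bool.true_or, Bool.not_true]
    · simp only [Bool.not_eq_true] at h
      simp only [h, Bool.false_or]
      exact ih

lemma pv_any_or (l : List (String × Int)) (f g : String × Int → Bool) :
    (l.any f || l.any g) = l.any (fun x => f x || g x) := by
  induction l with
  | nil => rfl
  | cons p rest ih =>
    simp only [List.any_cons, ← ih]
    ac_rfl

lemma pv_trig_union (k : String) :
    pvTrig k =
      ((k == "mask_token" || k == "mask_token" ++ ".weight")
       || (k == "decoder_embed" || k == "decoder_embed" ++ ".weight")
       || (k == "decoder_pos_embed" || k == "decoder_pos_embed" ++ ".weight")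
       || (k == "decoder_norm" || k == "decoder_norm" ++ ".weight")
       || (k == "pred_head" || k == "pred_head" ++ ".weight")
       || (k == "encoder_to_decoder" || k == "encoder_to_decoder" ++ ".weight")
       || PySem.Str.startswith k "decoder_blocks.") := by
  have hset : PySem.Set.union (PySem.Set.ofList pvBase)
      (PySem.Set.ofList (pvBase.map (fun b => b ++ ".weight"))) =
      ["mask_token", "decoder_embed", "decoder_pos_embed", "decoder_norm",
       "pred_head", "encoder_to_decoder",
       "mask_token.weight", "decoder_embed.weight", "decoder_pos_embed.weight",
       "decoder_norm.weight", "pred_head.weight", "encoder_to_decoder.weight"] := by decide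
  rw [pvTrig, hset]
  simp only [PySem.Set.contains, List.contains_cons, List.contains_nil, Bool.or_false]
  rw [show ("mask_token" ++ ".weight" : String) = "mask_token.weight" from by decide,
      show ("decoder_embed" ++ ".weight" : String) = "decoder_embed.weight" from by decide,
      show ("decoder_pos_embed" ++ ".weight" : String) = "decoder_pos_embed.weight" from by decide,
      show ("decoder_norm" ++ ".weight" : String) = "decoder_norm.weight" from by decide,
      show ("pred_head" ++ ".weight" : String) = "pred_head.weight" from by decide,
      show ("encoder_to_decoder" ++ ".weight" : String) = "encoder_to_decoder.weight" from by decide]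
  ac_rfl

theorem pv_eq (state_dict : List (String × Int)) :
    is_encoder_only_py state_dict = is_encoder_only_py_alt state_dict := by
  show _ = pvScan _ state_dict
  rw [pvScan_eq_any]
  have hR : (state_dict.any fun p =>
        PySem.Set.contains (PySem.Set.union (PySem.Set.ofList pvBase)
          (PySem.Set.ofList (pvBase.map (fun k => k ++ ".weight")))) p.1 ||
        PySem.Str.startswith p.1 "decoder_blocks.")
      = state_dict.any (fun p =>
        ((p.1 == "mask_token" || p.1 == "mask_token" ++ ".weight")
         || (p.1 == "decoder_embed" || p.1 == "decoder_embed" ++ ".weight")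
         || (p.1 == "decoder_pos_embed" || p.1 == "decoder_pos_embed" ++ ".weight")
         || (p.1 == "decoder_norm" || p.1 == "decoder_norm" ++ ".weight")
         || (p.1 == "pred_head" || p.1 == "pred_head" ++ ".weight")
         || (p.1 == "encoder_to_decoder" || p.1 == "encoder_to_decoder" ++ ".weight")
         || PySem.Str.startswith p.1 "decoder_blocks.")) := by
    refine congrArg (state_dict.any) (funext fun p => ?_)
    exact pv_trig_union p.1
  rw [hR]
  simp only [is_encoder_only_py]
  have hfilter : decide ((List.filter (fun k => PySem.Str.startswith k "decoder_blocks.")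
        (PySem.Dict.keys (PySem.Dict.mk state_dict))).length > 0) =
      state_dict.any (fun p => PySem.Str.startswith p.1 "decoder_blocks.") := by
    rw [Bool.eq_iff_iff]
    simp [PySem.Dict.keys, List.length_pos_iff, List.filter_eq_nil_iff, List.any_eq_true]
  rw [hfilter]
  simp only [PySem.Dict.contains, List.any_cons, List.any_nil, Bool.or_false]
  congr 1
  simp only [pv_any_or]
  refine congrArg (state_dict.any) (funext fun p => ?_)
  ac_rfl

-- ===== VERDICT (by name: the statement is the Claim_ definition above) =====
theorem is_encoder_only_py_spec : Claim_equal_is_encoder_only_py := by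
  intro sd _
  exact pv_eq sd
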